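-- pv_equiv track=rewrite | github.com/CanoANO/Commuter | components/database/gateways/route_plans.py | _derive_legacy_mode_fields
-- ===== SOURCE A (Python) =====
-- def _derive_legacy_mode_fields(segment_modes: list[str]) -> tuple[str | None, str | None]:
--     cleaned = [(item or "").strip().lower() for item in (segment_modes or []) if (item or "").strip()]
--     if not cleaned:
--         return None, None
--
--     if len(cleaned) == 1:
--         return cleaned[0], None
--
--     if len(cleaned) == 2 and set(cleaned) == {"drive", "transit"}:
--         return "mixed", "first" if cleaned[0] == "drive" else "second"
--
--     if all(item == cleaned[0] for item in cleaned):
--         return cleaned[0], None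
--
--     return None, None
-- ===== SOURCE B (Python) =====
-- def _derive_legacy_mode_fields(segment_modes):
--     # single pass with an accumulator: no intermediate 'cleaned' list is built
--     first = None
--     second = None
--     count = 0
--     uniform = True
--     for item in (segment_modes or []):
--         s = (item or "").strip()
--         if not s:
--             continue
--         s = s.lower()
--         count += 1
--         if count == 1:
--             first = s
--         else:
--             if count == 2:
--                 second = s
--             if s != first:
--                 uniform = False
--     if count == 0:
--         return None, None
--     if uniform:
--         return first, None
--     if count == 2 and ((first, second) == ("drive", "transit") or (first, second) == ("transit", "drive")):
--         return "mixed", "first" if first == "drive" else "second"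
--     return None, None
-- ===== Notes on version B (the rewrite author's own statement) =====
-- stated objective: alternative
-- what changed: B replaces A's build-a-cleaned-list-then-branch structure with a single fold that maintains (first, second, count, uniform) as it scans, so no intermediate list is materialized and the all()-scan and set comparison disappear; the mixed case becomes a direct tuple comparison on the first two kept elements.
import Mathlib
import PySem

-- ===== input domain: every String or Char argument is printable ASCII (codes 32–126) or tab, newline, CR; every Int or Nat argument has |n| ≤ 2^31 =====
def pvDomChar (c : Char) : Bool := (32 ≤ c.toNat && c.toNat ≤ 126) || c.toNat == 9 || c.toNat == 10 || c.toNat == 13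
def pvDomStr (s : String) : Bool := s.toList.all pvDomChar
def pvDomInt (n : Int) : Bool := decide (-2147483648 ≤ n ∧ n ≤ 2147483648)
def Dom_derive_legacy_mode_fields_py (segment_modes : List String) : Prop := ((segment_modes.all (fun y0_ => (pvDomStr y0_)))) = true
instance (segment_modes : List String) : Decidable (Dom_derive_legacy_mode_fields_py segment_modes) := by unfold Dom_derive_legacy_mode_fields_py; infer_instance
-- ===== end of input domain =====

-- B replaces A's build-cleaned-list-then-branch structure with a single fold keeping (first, second, count, uniform); alternative decomposition, same cost.


-- ===== PORT A =====
-- the comprehension: [(item or "").strip().lower() for item in segment_modes if (item or "").strip()]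
def pvCleaned (segment_modes : List String) : List String :=
  (segment_modes.filter (fun item => PySem.Str.strip item != "")).map
    (fun item => PySem.Str.lower (PySem.Str.strip item))

def derive_legacy_mode_fields_py (segment_modes : List String) : Option String × Option String :=
  let cleaned := pvCleaned segment_modes
  if cleaned = [] then (none, none)
  else if cleaned.length = 1 then (some (cleaned.headD ""), none)  -- cleaned[0]: guarded nonempty
  else if cleaned.length = 2 ∧ PySem.Set.equal (PySem.Set.ofList cleaned) (PySem.Set.ofList ["drive", "transit"]) then
    (some "mixed", some (if cleaned.headD "" = "drive" then "first" else "second"))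
  else if cleaned.all (fun item => item == cleaned.headD "") then (some (cleaned.headD ""), none)
  else (none, none)

-- ===== PORT B =====
-- the loop body of Source B (state = (first, second, count, uniform))
def pvStep (st : Option String × Option String × Int × Bool) (item : String) :
    Option String × Option String × Int × Bool :=
  if PySem.Str.strip item = "" then st  -- 'continue'
  else
    let s := PySem.Str.lower (PySem.Str.strip item)
    let (first, second, count, uniform) := st
    let count := count + 1
    if count = 1 then (some s, second, count, uniform)
    else
      let second := if count = 2 then some s else second
      if some s ≠ first then (first, second, count, false)
      else (first, second, count, uniform)

def derive_legacy_mode_fields_py_alt (segment_modes : List String) : Option String × Option String :=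
  let st := segment_modes.foldl pvStep (none, none, 0, true)
  let first := st.1
  let second := st.2.1
  let count := st.2.2.1
  let uniform := st.2.2.2
  if count = 0 then (none, none)
  else if uniform then (first, none)
  else if count = 2 ∧ ((first, second) = (some "drive", some "transit") ∨ (first, second) = (some "transit", some "drive")) then
    (some "mixed", some (if first = some "drive" then "first" else "second"))
  else (none, none)

-- ===== PRECONDITION & SPEC =====
def Spec_derive_legacy_mode_fields_py (segment_modes : List String) (out : Option String × Option String) : Prop := out = derive_legacy_mode_fields_py_alt segment_modes
instance (segment_modes : List String) (out : Option String × Option String) : Decidable (Spec_derive_legacy_mode_fields_py segment_modes out) := by unfold Spec_derive_legacy_mode_fields_py; infer_instance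

-- ===== CLAIM (what is proved, stated in full; the proofs are below) =====
def Claim_equal_derive_legacy_mode_fields_py : Prop := ∀ (segment_modes : List String), Dom_derive_legacy_mode_fields_py segment_modes → Spec_derive_legacy_mode_fields_py segment_modes (derive_legacy_mode_fields_py segment_modes)

-- ===== LEMMAS AND PROOFS =====

-- pvStep applied to an already-cleaned (nonempty, stripped, lowered) element
def pvStepC (st : Option String × Option String × Int × Bool) (s : String) :
    Option String × Option String × Int × Bool :=
  let (first, second, count, uniform) := st
  let count := count + 1
  if count = 1 then (some s, second, count, uniform)
  else
    let second := if count = 2 then some s else second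
    if some s ≠ first then (first, second, count, false)
    else (first, second, count, uniform)

-- folding pvStep over the raw list = folding pvStepC over the cleaned list
lemma pv_fold_cleaned (l : List String) (st : Option String × Option String × Int × Bool) :
    l.foldl pvStep st = (pvCleaned l).foldl pvStepC st := by
  induction l generalizing st with
  | nil => rfl
  | cons a t ih =>
    by_cases h : PySem.Str.strip a = ""
    · simp only [List.foldl_cons, pvCleaned, List.filter_cons]
      rw [if_neg (by simp [h])]
      rw [show pvStep st a = st by simp [pvStep, h]]
      simpa [pvCleaned] using ih st
    · simp only [List.foldl_cons, pvCleaned, List.filter_cons]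
      rw [if_pos (by simp [h])]
      simp only [List.map_cons, List.foldl_cons]
      rw [show pvStep st a = pvStepC st (PySem.Str.lower (PySem.Str.strip a)) by
        simp [pvStep, pvStepC, h]]
      simpa [pvCleaned] using ih (pvStepC st (PySem.Str.lower (PySem.Str.strip a)))

-- once count ≥ 2, first and second are frozen and uniform only records equality with first
lemma pv_run2 (t : List String) (a : String) (sec : Option String) (k : Int) (u : Bool)
    (hk : 2 ≤ k) :
    t.foldl pvStepC (some a, sec, k, u) = (some a, sec, k + t.length, u && t.all (· == a)) := by
  induction t generalizing k u with
  | nil => simp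
  | cons b t ih =>
    have h1 : ¬ k + 1 = 1 := by omega
    have h2 : ¬ k + 1 = 2 := by omega
    simp only [List.foldl_cons]
    rw [show pvStepC (some a, sec, k, u) b
        = (some a, sec, k + 1, if b = a then u else false) by
      simp only [pvStepC, h1, if_false, h2]
      by_cases hb : b = a <;> simp [hb]]
    rw [ih (k + 1) _ (by omega)]
    have hc : k + 1 + (t.length : Int) = k + ((b :: t).length : Int) := by
      simp; omega
    have hb2 : ((if b = a then u else false) && t.all (· == a))
        = (u && (b :: t).all (· == a)) := by
      by_cases hb : b = a <;> simp [hb]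
    rw [hc, hb2]

-- characterization of the whole fold on a nonempty cleaned list
lemma pv_fold_char (a b : String) (u : List String) :
    (a :: b :: u).foldl pvStepC (none, none, 0, true)
      = (some a, some b, (2 : Int) + u.length, (b == a) && u.all (· == a)) := by
  simp only [List.foldl_cons]
  rw [show pvStepC (none, none, 0, true) a = (some a, none, 1, true) by simp [pvStepC]]
  rw [show pvStepC (some a, none, 1, true) b = (some a, some b, 2, b == a) by
    simp only [pvStepC]
    by_cases hb : b = a <;> simp [hb]]
  exact pv_run2 u a (some b) 2 (b == a) (by omega)

-- if all of a :: t equals a, set(a :: t) is never {"drive","transit"}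
lemma pv_not_equal_dt (a : String) (t : List String) (h : ∀ x ∈ t, x = a) :
    ¬ PySem.Set.equal (PySem.Set.ofList (a :: t)) (PySem.Set.ofList ["drive", "transit"]) = true := by
  intro heq
  rw [PySem.Set.equal_iff] at heq
  have hd : ("drive" : String) ∈ (a :: t) := by
    have := (heq "drive").2 (by decide)
    rwa [PySem.Set.mem_ofList] at this
  have ht : ("transit" : String) ∈ (a :: t) := by
    have := (heq "transit").2 (by decide)
    rwa [PySem.Set.mem_ofList] at this
  have hd' : a = "drive" := by
    rcases List.mem_cons.1 hd with h1 | h1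
    · exact h1.symm
    · exact (h _ h1).symm
  have ht' : a = "transit" := by
    rcases List.mem_cons.1 ht with h1 | h1
    · exact h1.symm
    · exact (h _ h1).symm
  rw [hd'] at ht'
  exact absurd ht' (by decide)

-- for a two-element cleaned list with distinct elements, the set test names the pair
lemma pv_equal_dt_iff (a b : String) (hne : b ≠ a) :
    PySem.Set.equal (PySem.Set.ofList [a, b]) (PySem.Set.ofList ["drive", "transit"]) = true
      ↔ (a = "drive" ∧ b = "transit") ∨ (a = "transit" ∧ b = "drive") := by
  constructor
  · intro heq
    rw [PySem.Set.equal_iff] at heq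
    have ha : a ∈ ["drive", "transit"] := by
      have := (heq a).1 (by rw [PySem.Set.mem_ofList]; simp)
      rwa [PySem.Set.mem_ofList] at this
    have hb : b ∈ ["drive", "transit"] := by
      have := (heq b).1 (by rw [PySem.Set.mem_ofList]; simp)
      rwa [PySem.Set.mem_ofList] at this
    simp only [List.mem_cons, List.not_mem_nil, or_false] at ha hb
    rcases ha with ha | ha <;> rcases hb with hb | hb
    · exact absurd (hb.trans ha.symm) hne
    · exact Or.inl ⟨ha, hb⟩
    · exact Or.inr ⟨ha, hb⟩
    · exact absurd (hb.trans ha.symm) hne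
  · rintro (⟨ha, hb⟩ | ⟨ha, hb⟩) <;> subst ha <;> subst hb <;> decide

-- ===== VERDICT (by name: the statement is the Claim_ definition above) =====
theorem derive_legacy_mode_fields_py_spec : Claim_equal_derive_legacy_mode_fields_py := by
  intro segment_modes _
  unfold Spec_derive_legacy_mode_fields_py derive_legacy_mode_fields_py derive_legacy_mode_fields_py_alt
  rw [pv_fold_cleaned]
  generalize pvCleaned segment_modes = c
  match c with
  | [] => simp
  | [a] =>
    rw [show ([a] : List String).foldl pvStepC (none, none, 0, true) = (some a, none, 1, true) by
      simp [pvStepC]]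
    simp
  | a :: b :: u =>
    rw [pv_fold_char]
    rw [if_neg (show ¬(a :: b :: u) = ([] : List String) by simp)]
    rw [if_neg (show ¬(a :: b :: u).length = 1 by simp)]
    have h0 : ¬((2 : Int) + (u.length : Int) = 0) := by omega
    by_cases huni : ((b == a) && u.all fun x => x == a) = true
    · -- all kept elements equal: B's uniform branch; A's all() branch
      simp only [Bool.and_eq_true, beq_iff_eq, List.all_eq_true] at huni
      obtain ⟨hba, hu⟩ := huni
      have hall : ∀ x ∈ b :: u, x = a := by
        intro x hx; rcases List.mem_cons.1 hx with h1 | h1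
        · exact h1 ▸ hba
        · simpa using hu x h1
      rw [if_neg (by rintro ⟨-, h2⟩; exact pv_not_equal_dt a (b :: u) hall h2)]
      rw [if_pos (show ((a :: b :: u).all fun item => item == (a :: b :: u).headD "") = true by
        rw [List.all_eq_true]; intro x hx
        simp only [List.headD_cons, beq_iff_eq]
        rcases List.mem_cons.1 hx with h1 | h1
        · exact h1
        · exact hall x h1)]
      have hB : ((b == a) && u.all fun x => x == a) = true := by
        simp only [Bool.and_eq_true, beq_iff_eq, List.all_eq_true]
        exact ⟨hba, fun x hx => by simp [hu x hx]⟩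
      rw [if_neg h0, if_pos hB]
      simp
    · -- not uniform
      rw [if_neg h0, if_neg huni]
      have hallF : ¬((a :: b :: u).all fun item => item == (a :: b :: u).headD "") = true := by
        simp only [List.all_eq_true, List.headD_cons]
        intro h
        apply huni
        simp only [Bool.and_eq_true, beq_iff_eq, List.all_eq_true]
        exact ⟨by simpa using h b (by simp), fun x hx => by simpa using h x (by simp [hx])⟩
      by_cases hu0 : u = []
      · subst hu0
        have hba : b ≠ a := by intro h; apply huni; subst h; simp
        by_cases hmix : (a = "drive" ∧ b = "transit") ∨ (a = "transit" ∧ b = "drive")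
        · rcases hmix with ⟨h1, h2⟩ | ⟨h1, h2⟩ <;> subst h1 <;> subst h2 <;> decide
        · rw [if_neg (show ¬((a :: b :: ([] : List String)).length = 2 ∧
              PySem.Set.equal (PySem.Set.ofList (a :: b :: [])) (PySem.Set.ofList ["drive", "transit"]) = true)
              from fun h => hmix ((pv_equal_dt_iff a b hba).1 h.2))]
          rw [if_neg hallF]
          split_ifs with h h'
          · exfalso
            rcases h.2 with hpair | hpair
            · exact hmix (Or.inl ⟨by simpa using congrArg Prod.fst hpair,
                by simpa using congrArg Prod.snd hpair⟩)
            · exact hmix (Or.inr ⟨by simpa using congrArg Prod.fst hpair,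
                by simpa using congrArg Prod.snd hpair⟩)
          · exfalso
            rcases h.2 with hpair | hpair
            · exact hmix (Or.inl ⟨by simpa using congrArg Prod.fst hpair,
                by simpa using congrArg Prod.snd hpair⟩)
            · exact hmix (Or.inr ⟨by simpa using congrArg Prod.fst hpair,
                by simpa using congrArg Prod.snd hpair⟩)
          · rfl
      · have hul : u.length ≠ 0 := fun h => hu0 (List.length_eq_zero_iff.1 h)
        have hlen2 : ¬(a :: b :: u).length = 2 := by simp only [List.length_cons]; omega
        have hB2 : ¬((2 : Int) + (u.length : Int) = 2) := by
          have := Int.natCast_ne_zero.2 hul; omega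
        rw [if_neg (show ¬((a :: b :: u).length = 2 ∧
            PySem.Set.equal (PySem.Set.ofList (a :: b :: u)) (PySem.Set.ofList ["drive", "transit"]) = true)
            from fun h => hlen2 h.1)]
        rw [if_neg hallF]
        split_ifs with h h'
        · exact absurd h.1 hB2
        · exact absurd h.1 hB2
        · rfl
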